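-- pv_equiv track=rewrite | github.com/marcwempe/SlideQuest | src/slidequest/viewmodels/master.py | _images_to_content
-- ===== SOURCE A (Python) =====
-- def _images_to_content(images: dict[int, str]) -> list[str]:
--     if not images:
--         return []
--     max_area = max((area_id for area_id in images.keys() if area_id > 0), default=0)
--     if max_area <= 0:
--         return []
--     content = ["" for _ in range(max_area)]
--     for area_id, path in images.items():
--         if area_id <= 0 or not path:
--             continue
--         index = area_id - 1
--         if index >= len(content):
--             content.extend([""] * (index + 1 - len(content)))
--         content[index] = path
--     return content
-- ===== SOURCE B (Python) =====
-- def _images_to_content(images: dict[int, str]) -> list[str]: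
--     max_area = max((area_id for area_id in images if area_id > 0), default=0)
--     if max_area <= 0:
--         return []
--     return [images.get(i) or "" for i in range(1, max_area + 1)]
-- ===== Notes on version B (the rewrite author's own statement) =====
-- stated objective: simpler
-- what changed: A scatters dict items into a pre-sized list by computed index (with a dead extend branch); B gathers each output position 1..max_area directly with a dict lookup in a single comprehension.
import Mathlib
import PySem

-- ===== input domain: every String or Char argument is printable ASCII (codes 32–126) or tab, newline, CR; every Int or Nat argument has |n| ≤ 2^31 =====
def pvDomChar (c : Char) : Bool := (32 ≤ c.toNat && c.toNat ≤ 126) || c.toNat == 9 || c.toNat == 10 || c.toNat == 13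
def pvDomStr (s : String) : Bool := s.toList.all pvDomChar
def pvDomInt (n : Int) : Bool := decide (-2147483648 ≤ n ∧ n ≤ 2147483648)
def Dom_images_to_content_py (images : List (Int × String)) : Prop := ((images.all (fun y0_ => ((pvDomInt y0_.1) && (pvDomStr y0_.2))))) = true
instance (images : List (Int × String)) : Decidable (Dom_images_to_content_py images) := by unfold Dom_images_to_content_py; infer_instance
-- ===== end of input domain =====

-- B replaces A's scatter loop (write each item into a pre-sized list at a computed index, with a
-- dead extend branch) by a gather comprehension (one dict lookup per output position); objective: simpler.
-- The Python parameter is a dict; the List (Int × String) is its insertion sequence, so both ports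
-- first build the PySem.Dict exactly as Python dict construction does (last value wins, first-insertion
-- position kept) and then transcribe their Python line by line.

-- ===== PORT A =====
-- body of A's 'for area_id, path in images.items()' loop
def pvStepA (content : List String) (kv : Int × String) : List String :=
  if kv.1 ≤ 0 ∨ kv.2 = "" then content
  else
    let index := kv.1 - 1
    let content := if (content.length : Int) ≤ index then
        content ++ List.replicate ((index + 1 - (content.length : Int)).toNat) "" else content
    -- content[index] = path: index = area_id - 1 ≥ 0 in this branch, so .toNat is exact
    content.set index.toNat kv.2

def images_to_content_py (images : List (Int × String)) : List String :=
  let d : PySem.Dict Int String := images.foldl (fun d kv => d.insert kv.1 kv.2) PySem.Dict.empty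
  if d.items = [] then []
  else
    let max_area : Int := PySem.List.maxD (d.keys.filter (fun a => decide (0 < a))) (fun x => x) 0
    if max_area ≤ 0 then []
    else
      let content := (PySem.List.pyRange 0 max_area 1).map (fun _ => "")
      d.items.foldl pvStepA content

-- ===== PORT B =====
def images_to_content_py_alt (images : List (Int × String)) : List String :=
  let d : PySem.Dict Int String := images.foldl (fun d kv => d.insert kv.1 kv.2) PySem.Dict.empty
  let max_area : Int := PySem.List.maxD (d.keys.filter (fun a => decide (0 < a))) (fun x => x) 0
  if max_area ≤ 0 then []
  else
    (PySem.List.pyRange 1 (max_area + 1) 1).map (fun i =>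
      match d.get? i with      -- images.get(i) or ""
      | none => ""
      | some p => if p = "" then "" else p)

-- ===== PRECONDITION & SPEC =====
def Spec_images_to_content_py (images : List (Int × String)) (out : List String) : Prop := out = images_to_content_py_alt images
instance (images : List (Int × String)) (out : List String) : Decidable (Spec_images_to_content_py images out) := by unfold Spec_images_to_content_py; infer_instance

-- ===== CLAIM (what is proved, stated in full; the proofs are below) =====
def Claim_equal_images_to_content_py : Prop := ∀ (images : List (Int × String)), Dom_images_to_content_py images → Spec_images_to_content_py images (images_to_content_py images)

-- ===== LEMMAS AND PROOFS =====

-- A's loop, over an item list with distinct keys all bounded by the content length, sets exactly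
-- the positions whose key occurs with a nonempty path (and the extend branch never fires).
lemma pvLoopA_spec (L : List (Int × String)) (content : List String)
    (hnd : (L.map Prod.fst).Nodup)
    (hub : ∀ p ∈ L, 0 < p.1 → p.1 ≤ (content.length : Int)) :
    L.foldl pvStepA content = (List.range content.length).map (fun (j : Nat) =>
      match L.find? (fun p => p.1 == ((j : Int) + 1)) with
      | some p => if p.2 = "" then content.getD j "" else p.2
      | none => content.getD j "") := by
  induction L generalizing content with
  | nil =>
    simp only [List.foldl_nil, List.find?_nil]
    apply List.ext_getElem
    · simp
    · intro i h1 h2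
      simp [List.getD_eq_getElem?_getD, h1]
  | cons p rest ih =>
    simp only [List.map_cons, List.nodup_cons] at hnd
    obtain ⟨hp, hrest⟩ := hnd
    rw [List.foldl_cons]
    by_cases hskip : p.1 ≤ 0 ∨ p.2 = ""
    · have h1 : pvStepA content p = content := by simp [pvStepA, hskip]
      rw [h1, ih content hrest (fun q hq => hub q (List.mem_cons_of_mem _ hq))]
      apply List.map_congr_left
      intro j hj
      rw [List.mem_range] at hj
      by_cases hkey : p.1 = (j : Int) + 1
      · rw [List.find?_cons_of_pos (by simp [hkey])]
        have hemp : p.2 = "" := by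
          rcases hskip with h | h
          · exfalso; omega
          · exact h
        have : rest.find? (fun q => q.1 == ((j : Int) + 1)) = none := by
          rw [List.find?_eq_none]
          intro x hx hbx
          exact hp (by rw [hkey, ← beq_iff_eq.mp hbx] at *; exact List.mem_map_of_mem hx)
        rw [this]
        simp [hemp]
      · rw [List.find?_cons_of_neg (by simp [hkey])]
    · have hpos : ¬ p.1 ≤ 0 := fun h => hskip (Or.inl h)
      have hne : p.2 ≠ "" := fun h => hskip (Or.inr h)
      have hposs : 0 < p.1 := by omega
      have hlen : p.1 ≤ (content.length : Int) := hub p (List.mem_cons_self) hposs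
      have hstep : pvStepA content p = content.set (p.1 - 1).toNat p.2 := by
        simp only [pvStepA, if_neg hskip]
        rw [if_neg (by omega)]
      have hlen' : (content.set (p.1 - 1).toNat p.2).length = content.length := by simp
      rw [hstep, ih _ hrest (fun q hq hq0 => by
        rw [hlen']; exact hub q (List.mem_cons_of_mem _ hq) hq0)]
      rw [hlen']
      apply List.map_congr_left
      intro j hj
      rw [List.mem_range] at hj
      by_cases hkey : p.1 = (j : Int) + 1
      · have hj' : (p.1 - 1).toNat = j := by omega
        rw [List.find?_cons_of_pos (by simp [hkey])]
        have : rest.find? (fun q => q.1 == ((j : Int) + 1)) = none := by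
          rw [List.find?_eq_none]
          intro x hx hbx
          exact hp (by rw [hkey, ← beq_iff_eq.mp hbx] at *; exact List.mem_map_of_mem hx)
        rw [this]
        simp only [if_neg hne]
        rw [List.getD_eq_getElem?_getD, hj', List.getElem?_set]
        simp [hj]
      · have hj' : (p.1 - 1).toNat ≠ j := by omega
        rw [List.find?_cons_of_neg (by simp [hkey])]
        have hgd : (content.set (p.1 - 1).toNat p.2).getD j "" = content.getD j "" := by
          rw [List.getD_eq_getElem?_getD, List.getD_eq_getElem?_getD, List.getElem?_set, if_neg hj']
        rw [hgd]

lemma pv_main_eq (images : List (Int × String)) :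
    images_to_content_py images = images_to_content_py_alt images := by
  unfold images_to_content_py images_to_content_py_alt
  set d : PySem.Dict Int String :=
    images.foldl (fun d kv => d.insert kv.1 kv.2) PySem.Dict.empty with hd
  have hnd : d.keys.Nodup := by
    rw [hd]
    exact PySem.Dict.nodup_keys_foldl_insert_key images Prod.fst (fun d kv => kv.2)
      PySem.Dict.empty (by simp [PySem.Dict.keys_empty])
  set M : Int := PySem.List.maxD (d.keys.filter (fun a => decide (0 < a))) (fun x => x) 0 with hM
  by_cases hMle : M ≤ 0
  · by_cases hit : d.items = []
    · rw [if_pos hit, if_pos hMle]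
    · rw [if_neg hit, if_pos hMle, if_pos hMle]
  · have hMpos : 0 < M := by omega
    have hkeysne : d.keys ≠ [] := by
      intro h
      rw [hM, h] at hMpos
      simp [PySem.List.maxD_nil] at hMpos
    have hit : d.items ≠ [] := by
      intro h
      exact hkeysne (by simp [PySem.Dict.keys, h])
    rw [if_neg hit, if_neg hMle, if_neg hMle]
    have hub : ∀ p ∈ d.items, 0 < p.1 → p.1 ≤ M := by
      intro p hp hppos
      have hk : p.1 ∈ d.keys := PySem.Dict.mem_keys_of_mem_items d hp
      have hf : p.1 ∈ d.keys.filter (fun a => decide (0 < a)) := by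
        simp [List.mem_filter, hk, hppos]
      have hne : d.keys.filter (fun a => decide (0 < a)) ≠ [] := List.ne_nil_of_mem hf
      have hmax := PySem.List.max?_eq_some_maxD _ (fun x => x) 0 hne
      exact PySem.List.max?_id_le (hM ▸ hmax) _ hf
    set content0 : List String := (PySem.List.pyRange 0 M 1).map (fun _ => "") with hc0
    have hrep : content0 = List.replicate M.toNat "" := by
      rw [hc0, PySem.List.pyRange_one]
      simp [List.eq_replicate_iff]
    have hc0len : content0.length = M.toNat := by rw [hrep]; simp
    have hcast : (content0.length : Int) = M := by
      rw [hc0len]; omega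
    rw [pvLoopA_spec d.items content0 hnd (fun p hp h0 => hcast ▸ hub p hp h0)]
    rw [PySem.List.pyRange_one]
    have h1 : (M + 1 - 1) = M := by ring
    rw [h1, List.map_map, hc0len]
    apply List.map_congr_left
    intro j hj
    rw [List.mem_range] at hj
    have hgd : content0[j]?.getD "" = "" := by
      rw [hrep]
      simp [hj]
    simp only [Function.comp]
    have hcomm : (1 : Int) + (j : Int) = (j : Int) + 1 := by ring
    rw [hcomm]
    cases hfind : d.items.find? (fun p => p.1 == ((j : Int) + 1)) with
    | none =>
      have hg : d.get? ((j : Int) + 1) = none := by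
        rw [PySem.Dict.get?_eq_none_iff_not_mem_keys]
        intro hk
        rw [List.find?_eq_none] at hfind
        obtain ⟨v, hv⟩ : ∃ v, ((j : Int) + 1, v) ∈ d.items := by
          simpa [PySem.Dict.keys] using hk
        exact hfind _ hv (by simp)
      simp [hg, hgd]
    | some p =>
      have hp1 : p.1 = (j : Int) + 1 := by simpa using List.find?_some hfind
      have hpm : p ∈ d.items := List.mem_of_find?_eq_some hfind
      have hg : d.get? ((j : Int) + 1) = some p.2 := by
        rw [PySem.Dict.get?_eq_some_iff_mem_items d _ _ hnd, ← hp1]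
        exact hpm
      rw [hg]
      split <;> simp_all

-- ===== VERDICT (by name: the statement is the Claim_ definition above) =====
theorem images_to_content_py_spec : Claim_equal_images_to_content_py := by
  intro images _
  unfold Spec_images_to_content_py
  exact pv_main_eq images
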